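-- pv_equiv track=rewrite | github.com/Justin-Ott/Yar | main.py | card_count
-- ===== SOURCE A (Python) =====
-- def card_count(cards, totals):
--     for x in range(len(cards)):
--         card = cards[x - 1]
--         if card == 1:
--             totals[0] = totals[0] + 1
--         elif card == 2:
--             totals[1] = totals[1] + 1
--         elif card == 3:
--             totals[2] = totals[2] + 1
--         elif card == 4:
--             totals[3] = totals[3] + 1
--         elif card == 5:
--             totals[4] = totals[4] + 1
--         else:
--             totals[5] = totals[5] + 1
--     return totals
-- ===== SOURCE B (Python) =====
-- def card_count(cards, totals):
--     other = len(cards)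
--     for i in range(5):
--         c = cards.count(i + 1)
--         other -= c
--         if c:
--             totals[i] += c
--     if other:
--         totals[5] += other
--     return totals
-- ===== Notes on version B (the rewrite author's own statement) =====
-- stated objective: alternative
-- what changed: Replaces A's single per-element if/elif dispatch loop by five staged cards.count(i+1) scans whose counts are added into totals[0..4], deriving the else bucket by subtraction from len(cards) instead of ever testing individual cards.
import Mathlib
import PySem

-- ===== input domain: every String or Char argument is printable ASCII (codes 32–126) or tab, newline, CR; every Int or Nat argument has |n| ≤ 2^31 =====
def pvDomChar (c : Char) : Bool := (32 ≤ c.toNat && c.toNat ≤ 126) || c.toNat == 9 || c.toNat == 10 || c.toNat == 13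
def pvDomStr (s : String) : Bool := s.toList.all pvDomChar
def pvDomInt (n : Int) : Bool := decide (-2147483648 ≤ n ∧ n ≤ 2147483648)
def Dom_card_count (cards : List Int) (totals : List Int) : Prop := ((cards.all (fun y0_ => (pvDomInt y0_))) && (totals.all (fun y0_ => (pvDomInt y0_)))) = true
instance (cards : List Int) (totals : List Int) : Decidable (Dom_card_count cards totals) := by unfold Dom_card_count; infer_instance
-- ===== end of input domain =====

-- B replaces A's per-element if/elif dispatch by five staged cards.count(i+1) scans added into
-- totals[0..4], with the else bucket derived by subtraction from len(cards) (alternative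
-- decomposition, same cost). Both Pythons mutate `totals` in place in the same way; the
-- equivalence proved here is about the return value.


-- ===== PORT A =====
def card_count (cards : List Int) (totals : List Int) : List Int :=
  (List.range cards.length).foldl (fun (t : List Int) (x : Nat) =>
    match PySem.List.pyGet? cards ((x : Int) - 1) with
    | none => t  -- unreachable: 0 ≤ x < len cards, so x-1 is a valid Python index
    | some card =>
      if card = 1 then t.set 0 (t.getD 0 0 + 1)
      else if card = 2 then t.set 1 (t.getD 1 0 + 1)
      else if card = 3 then t.set 2 (t.getD 2 0 + 1)
      else if card = 4 then t.set 3 (t.getD 3 0 + 1)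
      else if card = 5 then t.set 4 (t.getD 4 0 + 1)
      else t.set 5 (t.getD 5 0 + 1)) totals
  -- totals[i] read/write ported as getD/set: exact under Pre_card_count, which puts every touched index in range

-- ===== PORT B =====
-- `if c: totals[i] += c` from Source B, as a helper (read/write ported as getD/set: exact under
-- Pre_card_count, which puts every index with a nonzero count in range)
def pvCondAdd (t : List Int) (i : Nat) (c : Int) : List Int :=
  if c ≠ 0 then t.set i (t.getD i 0 + c) else t

def card_count_alt (cards : List Int) (totals : List Int) : List Int :=
  let st := (List.range 5).foldl (fun (st : Int × List Int) (i : Nat) =>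
      let c : Int := (PySem.List.count cards ((i : Int) + 1) : Int)
      (st.1 - c, pvCondAdd st.2 i c)) ((cards.length : Int), totals)
  pvCondAdd st.2 5 st.1

-- ===== PRECONDITION & SPEC =====
-- the bucket index A's if/elif chain writes to for a given card value
def pvBucket (c : Int) : Nat :=
  if c = 1 then 0 else if c = 2 then 1 else if c = 3 then 2
  else if c = 4 then 3 else if c = 5 then 4 else 5

-- exactly the inputs on which Python A returns: every card's bucket index exists in totals
-- (otherwise A raises IndexError; B raises there too)
def Pre_card_count (cards : List Int) (totals : List Int) : Prop :=
  ∀ c ∈ cards, pvBucket c < totals.length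
instance (cards : List Int) (totals : List Int) : Decidable (Pre_card_count cards totals) := by
  unfold Pre_card_count; infer_instance

def pvWitness_card_count : List Int × List Int := ([1, 7, 3, 3], [0, 0, 0, 0, 0, 0])

def Spec_card_count (cards : List Int) (totals : List Int) (out : List Int) : Prop := out = card_count_alt cards totals
instance (cards : List Int) (totals : List Int) (out : List Int) : Decidable (Spec_card_count cards totals out) := by unfold Spec_card_count; infer_instance

-- ===== CLAIM (what is proved, stated in full; the proofs are below) =====
def Claim_equal_card_count : Prop := ∀ (cards : List Int) (totals : List Int), Dom_card_count cards totals → Pre_card_count cards totals → Spec_card_count cards totals (card_count cards totals)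

-- ===== LEMMAS AND PROOFS =====

-- canonical single-card update A's loop body is reduced to
def pvBump (t : List Int) (c : Int) : List Int :=
  t.set (pvBucket c) (t.getD (pvBucket c) 0 + 1)

theorem pvBucket_lt_six (c : Int) : pvBucket c < 6 := by
  unfold pvBucket; split_ifs <;> omega

theorem stepA_eq_bump (t : List Int) (c : Int) :
    (if c = 1 then t.set 0 (t.getD 0 0 + 1)
     else if c = 2 then t.set 1 (t.getD 1 0 + 1)
     else if c = 3 then t.set 2 (t.getD 2 0 + 1)
     else if c = 4 then t.set 3 (t.getD 3 0 + 1)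
     else if c = 5 then t.set 4 (t.getD 4 0 + 1)
     else t.set 5 (t.getD 5 0 + 1)) = pvBump t c := by
  unfold pvBump pvBucket; split_ifs <;> rfl

theorem bump_getElem? (t : List Int) (c : Int) (j : Nat) :
    (pvBump t c)[j]? = t[j]?.map (· + if pvBucket c = j then (1 : Int) else 0) := by
  unfold pvBump
  by_cases h : pvBucket c = j
  · subst h
    by_cases hl : pvBucket c < t.length
    · simp [hl, List.getD_eq_getElem?_getD]
    · have hle : t.length ≤ pvBucket c := by omega
      simp [List.set_eq_of_length_le hle, List.getElem?_eq_none hle]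
  · simp [List.getElem?_set_ne h, h]

theorem foldl_bump_getElem? (L : List Int) (t : List Int) (j : Nat) :
    (L.foldl pvBump t)[j]? =
      t[j]?.map (· + (L.countP (fun c => decide (pvBucket c = j)) : Int)) := by
  induction L generalizing t with
  | nil => cases h : t[j]? <;> simp [h]
  | cons c cs ih =>
    simp only [List.foldl_cons, ih, bump_getElem?, List.countP_cons]
    cases t[j]? with
    | none => simp
    | some v =>
      by_cases h : pvBucket c = j <;> simp [h] <;> ring

-- A's loop reads cards[-1], cards[0], …, cards[n-2]: the rotation of cards by n-1
theorem mapA_eq_rotate (cards : List Int) :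
    (List.range cards.length).map
        (fun (x : Nat) => (PySem.List.pyGet? cards ((x : Int) - 1)).getD 0) =
      cards.rotate (cards.length - 1) := by
  cases cards with
  | nil => rfl
  | cons a as =>
    apply List.ext_getElem
    · simp [List.length_rotate]
    · intro i h1 h2
      simp only [List.length_map, List.length_range] at h1
      rw [List.getElem_map, List.getElem_range, List.getElem_rotate]
      cases i with
      | zero =>
        rw [show ((0 : Nat) : Int) - 1 = -1 by norm_num, PySem.List.pyGet?_neg_one]
        have hn : (0 + ((a :: as).length - 1)) % (a :: as).length = (a :: as).length - 1 := by
          rw [Nat.zero_add, Nat.mod_eq_of_lt (by simp)]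
        simp only [hn]
        rw [List.getLast?_eq_getElem?, List.getElem?_eq_getElem (by simp)]
        rfl
      | succ k =>
        rw [show ((k + 1 : Nat) : Int) - 1 = ((k : Nat) : Int) by push_cast; ring,
          PySem.List.pyGet?_natCast]
        have hk : k < (a :: as).length := by omega
        rw [List.getElem?_eq_getElem (by omega)]
        have hidx : (k + 1 + ((a :: as).length - 1)) % (a :: as).length = k := by
          rw [show k + 1 + ((a :: as).length - 1) = (a :: as).length + k from by omega,
            Nat.add_mod_left, Nat.mod_eq_of_lt (by omega)]
        simp only [hidx]
        rfl

theorem card_count_eq_fold (cards totals : List Int) :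
    card_count cards totals = (cards.rotate (cards.length - 1)).foldl pvBump totals := by
  unfold card_count
  rw [← mapA_eq_rotate, List.foldl_map]
  apply PySem.List.foldl_congr_mem
  intro t x hx
  have hx' : x < cards.length := List.mem_range.mp hx
  have h0 : cards ≠ [] := by
    intro h; subst h; simp at hx'
  cases x with
  | zero =>
    rw [show ((0 : Nat) : Int) - 1 = -1 by norm_num, PySem.List.pyGet?_neg_one]
    rw [List.getLast?_eq_getElem?, List.getElem?_eq_getElem (by omega)]
    exact stepA_eq_bump t _
  | succ k =>
    rw [show ((k + 1 : Nat) : Int) - 1 = ((k : Nat) : Int) by push_cast; ring,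
      PySem.List.pyGet?_natCast, List.getElem?_eq_getElem (by omega)]
    exact stepA_eq_bump t _

theorem card_count_getElem? (cards totals : List Int) (j : Nat) :
    (card_count cards totals)[j]? =
      totals[j]?.map (· + (cards.countP (fun c => decide (pvBucket c = j)) : Int)) := by
  rw [card_count_eq_fold, foldl_bump_getElem?,
    (cards.rotate_perm (cards.length - 1)).countP_eq]

-- B side: pvCondAdd reads as an unconditional addition at index i (adding 0 when it skips)
theorem condAdd_getElem? (t : List Int) (i : Nat) (c : Int) (j : Nat) :
    (pvCondAdd t i c)[j]? = t[j]?.map (· + if i = j then c else 0) := by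
  unfold pvCondAdd
  by_cases hc : c = 0
  · subst hc; cases h : t[j]? <;> simp [h]
  · rw [if_pos hc]
    by_cases h : i = j
    · subst h
      by_cases hl : i < t.length
      · simp [hl, List.getD_eq_getElem?_getD]
      · have hle : t.length ≤ i := by omega
        simp [List.set_eq_of_length_le hle, List.getElem?_eq_none hle]
    · simp [List.getElem?_set_ne h, h]

-- the count of value j+1 is the count of bucket j, for the five direct buckets
theorem count_eq_countP_bucket (cards : List Int) (j : Nat) (hj : j < 5) :
    List.count ((j : Int) + 1) cards =
      cards.countP (fun c => decide (pvBucket c = j)) := by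
  rw [List.count_eq_countP]
  apply List.countP_congr
  intro c _
  interval_cases j <;>
    · simp only [decide_eq_true_eq, pvBucket, beq_iff_eq]
      constructor
      · intro h; subst h; norm_num
      · intro h; split_ifs at h <;> omega

-- every card lands in exactly one of the six buckets
theorem length_eq_sum_buckets (cards : List Int) :
    cards.length =
      cards.countP (fun c => decide (pvBucket c = 0)) +
      cards.countP (fun c => decide (pvBucket c = 1)) +
      cards.countP (fun c => decide (pvBucket c = 2)) +
      cards.countP (fun c => decide (pvBucket c = 3)) +
      cards.countP (fun c => decide (pvBucket c = 4)) +
      cards.countP (fun c => decide (pvBucket c = 5)) := by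
  induction cards with
  | nil => simp
  | cons c cs ih =>
    simp only [List.length_cons, List.countP_cons, ih]
    have h6 := pvBucket_lt_six c
    rcases (by omega : pvBucket c = 0 ∨ pvBucket c = 1 ∨ pvBucket c = 2 ∨ pvBucket c = 3 ∨
      pvBucket c = 4 ∨ pvBucket c = 5) with h | h | h | h | h | h <;> simp [h] <;> omega

theorem card_count_alt_getElem? (cards totals : List Int) (j : Nat) :
    (card_count_alt cards totals)[j]? =
      totals[j]?.map (· + (cards.countP (fun c => decide (pvBucket c = j)) : Int)) := by
  unfold card_count_alt
  rw [show List.range 5 = [0, 1, 2, 3, 4] from rfl]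
  simp only [List.foldl_cons, List.foldl_nil, condAdd_getElem?, Option.map_map]
  cases h : totals[j]? with
  | none => simp
  | some v =>
    simp only [Option.map_some, Option.some.injEq, Function.comp]
    by_cases hj : j < 6
    · interval_cases j <;>
        · simp only [Nat.cast_ofNat, Nat.cast_zero, Nat.cast_one,
            OfNat.ofNat_ne_zero, OfNat.ofNat_ne_one, Nat.reduceEqDiff, if_true, if_false]
          have h0 := count_eq_countP_bucket cards 0 (by omega)
          have h1 := count_eq_countP_bucket cards 1 (by omega)
          have h2 := count_eq_countP_bucket cards 2 (by omega)
          have h3 := count_eq_countP_bucket cards 3 (by omega)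
          have h4 := count_eq_countP_bucket cards 4 (by omega)
          have hs := length_eq_sum_buckets cards
          simp only [PySem.List.count_eq] at *
          push_cast at h0 h1 h2 h3 h4 hs ⊢
          norm_num at h0 h1 h2 h3 h4 ⊢
          omega
    · have hnone : cards.countP (fun c => decide (pvBucket c = j)) = 0 := by
        rw [List.countP_eq_zero]
        intro c _
        simp only [decide_eq_true_eq]
        have := pvBucket_lt_six c
        omega
      have hne : ∀ k : Nat, k < 6 → k ≠ j := by intro k hk; omega
      simp only [hnone, hne 0 (by omega), hne 1 (by omega), hne 2 (by omega),
        hne 3 (by omega), hne 4 (by omega), hne 5 (by omega), if_false]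
      simp

-- ===== VERDICT (by name: the statement is the Claim_ definition above) =====
theorem card_count_spec : Claim_equal_card_count := by
  intro cards totals _ _
  unfold Spec_card_count
  apply List.ext_getElem?
  intro j
  rw [card_count_getElem?, card_count_alt_getElem?]
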